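-- pv_equiv track=rewrite | github.com/seungriyou/algorithm-study | [Programmers]-Lv1/PGS-92334.py | solution
-- ===== SOURCE A (Python) =====
-- from typing import List
-- from collections import defaultdict
--
-- def solution(id_list: List[str], report: List[str], k: int) -> List[int]:
--     """
--     :param id_list: 이용자의 ID가 담긴 문자열 배열
--     :param report: 각 이용자가 신고한 이용자의 ID 정보가 담긴 문자열 배열
--     :param k: 정지 기준이 되는 신고 횟수
--     :return: 각 유저별로 처리 결과 메일을 받은 횟수를 담은 배열
--     """
--
--     id_idx = {user: i for i, user in enumerate(id_list)}
--     # pairs = [(이용자id, 신고한id)]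
--     pairs = [tuple(pair.split()) for pair in report]
--     # report_dict = { rcv1 : {snd1, snd2, ...}, }
--     report_dict = defaultdict(set)  # {user: set() for user in id_list}
--     for pair in pairs:
--         report_dict[pair[1]].add(pair[0])
--
--     result = [0] * len(id_list)
--
--     # 리스트의 길이 >= k인 경우, 각 신고자에게 메일 발송
--     for rcv, snds in report_dict.items():
--         if len(snds) >= k:
--             for snd in snds:
--                 result[id_idx[snd]] += 1
--
--     return result
-- ===== SOURCE B (Python) =====
-- from typing import List
--
-- def solution(id_list: List[str], report: List[str], k: int) -> List[int]:
--     # Gather per user instead of scattering into an index-addressed array: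
--     # build the unique (reporter, reported) pairs once, decide bans by counting
--     # directly over that pair set, then produce the answer as one per-user
--     # comprehension -- no id->index dict, no counter dict, no mutation.
--     pairs = {(t[0], t[1]) for t in (r.split() for r in report)}
--     banned = {t for s, t in pairs if sum(u == t for _, u in pairs) >= k}
--     return [sum(s == user and t in banned for s, t in pairs) for user in id_list]
-- ===== Notes on version B (the rewrite author's own statement) =====
-- stated objective: alternative
-- what changed: B gathers instead of scatters: no id->index dict, no grouping dict, no counter and no result-array mutation -- it builds the unique pair set once, decides bans by counting reporters directly over that set, and produces the answer as a single per-user counting comprehension.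
-- outside the precondition, e.g. on solution(['a', 'a'], ['a a'], 1): A returns [0, 1], B returns [1, 1]
import Mathlib
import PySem

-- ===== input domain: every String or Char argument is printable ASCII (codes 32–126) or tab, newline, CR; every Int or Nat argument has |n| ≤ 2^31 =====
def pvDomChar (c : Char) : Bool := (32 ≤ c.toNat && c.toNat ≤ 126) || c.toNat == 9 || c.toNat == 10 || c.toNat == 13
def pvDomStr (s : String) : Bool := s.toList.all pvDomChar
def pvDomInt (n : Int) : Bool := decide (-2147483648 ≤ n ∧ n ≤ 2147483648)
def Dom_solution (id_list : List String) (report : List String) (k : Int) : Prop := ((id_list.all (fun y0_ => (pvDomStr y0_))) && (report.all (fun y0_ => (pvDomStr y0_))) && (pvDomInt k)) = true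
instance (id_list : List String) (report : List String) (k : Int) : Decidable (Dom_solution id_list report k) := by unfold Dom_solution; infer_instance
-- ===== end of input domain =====

-- B gathers instead of scattering: it builds the unique (reporter, reported) pair set,
-- decides bans by counting reporters directly over that set, and produces the answer as
-- one per-user counting comprehension — no id→index dict, no grouping dict, no counter,
-- no result-array mutation (objective: alternative).

-- ===== PORT A =====
-- id_idx = {user: i for i, user in enumerate(id_list)}
def pvIdDict (id_list : List String) : PySem.Dict String Int :=
  (PySem.List.enumerate id_list).foldl (fun d p => d.insert p.2 p.1) PySem.Dict.empty

def solution (id_list : List String) (report : List String) (k : Int) : List Int :=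
  let id_idx := pvIdDict id_list
  -- pairs = [tuple(pair.split()) for pair in report]
  let pairs : List (List String) := report.map PySem.Str.split₀
  -- for pair in pairs: report_dict[pair[1]].add(pair[0])   (IndexError → none, excluded by Pre_)
  let rd? : Option (PySem.Dict String (PySem.Set String)) :=
    pairs.foldl (fun od pair => od.bind (fun d =>
      (PySem.List.pyGet? pair 1).bind (fun rcv =>
        (PySem.List.pyGet? pair 0).map (fun snd =>
          d.modify rcv PySem.Set.empty (fun s => s.add snd))))) (some PySem.Dict.empty)
  -- for rcv, snds in report_dict.items(): if len(snds) >= k: for snd in snds: result[id_idx[snd]] += 1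
  -- (KeyError → none, excluded by Pre_; the increments are order-independent, so folding the Set's list is exact)
  let res? : Option (List Int) := rd?.bind (fun rd =>
    rd.items.foldl (fun ores p => ores.bind (fun res =>
      if k ≤ PySem.Set.len p.2 then
        p.2.foldl (fun or snd => or.bind (fun r =>
          (id_idx.get? snd).bind (fun j =>
            (PySem.List.pyGet? r j).bind (fun v => PySem.List.pySet? r j (v + 1))))) (some res)
      else some res)) (some (PySem.List.pyRepeat [0] (PySem.List.len id_list))))
  res?.getD []

-- ===== PORT B =====
def solution_alt (id_list : List String) (report : List String) (k : Int) : List Int :=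
  -- pairs = {(t[0], t[1]) for t in (r.split() for r in report)}   (IndexError → none)
  let pairs? : Option (PySem.Set (String × String)) :=
    report.foldl (fun os r => os.bind (fun s =>
      let t := PySem.Str.split₀ r
      (PySem.List.pyGet? t 0).bind (fun a =>
        (PySem.List.pyGet? t 1).map (fun b => PySem.Set.add s (a, b))))) (some PySem.Set.empty)
  match pairs? with
  | none => []   -- IndexError, excluded by Pre_
  | some pairs =>
    -- banned = {t for s, t in pairs if sum(u == t for _, u in pairs) >= k}
    -- (set consumed only to build another set / count: order-independent, so folding is exact)
    let banned : PySem.Set String :=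
      pairs.foldl (fun s p =>
        if k ≤ ((pairs.countP (fun q => q.2 == p.2) : Nat) : Int) then PySem.Set.add s p.2 else s)
        PySem.Set.empty
    -- [sum(s == user and t in banned for s, t in pairs) for user in id_list]
    id_list.map (fun user =>
      ((pairs.countP (fun p => p.1 == user && PySem.Set.contains banned p.2) : Nat) : Int))

-- ===== PRECONDITION & SPEC =====
-- first and second whitespace token of a report entry (meaningful under the length-2 guard of Pre_)
def pvTok0 (r : String) : String := (PySem.Str.split₀ r).getD 0 ""
def pvTok1 (r : String) : String := (PySem.Str.split₀ r).getD 1 ""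
def pvPairs (report : List String) : List (String × String) :=
  report.map (fun r => (pvTok0 r, pvTok1 r))
-- user t was reported by at least k distinct reporters
def pvBannedP (report : List String) (k : Int) (t : String) : Prop :=
  k ≤ (((PySem.List.dedup (pvPairs report)).filter (fun p => p.2 == t)).length : Int)

-- Pre_ excludes (a) the inputs on which the Python A raises: a report entry with fewer
-- than two whitespace tokens (IndexError at pair[1]/pair[0]; B raises there too) and a
-- reporter of a banned user missing from id_list (KeyError at id_idx[snd]; B returns there),
-- and (b) inputs on which a reporter due a mail is an id listed TWICE in id_list, where
-- A's value is accidental: its id_idx dict keeps only the LAST index of a duplicated id,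
-- so only that copy is credited (B credits every copy).
def Pre_solution (id_list : List String) (report : List String) (k : Int) : Prop :=
  ∀ r ∈ report, 2 ≤ (PySem.Str.split₀ r).length ∧
    (pvBannedP report k (pvTok1 r) → pvTok0 r ∈ id_list ∧ id_list.count (pvTok0 r) ≤ 1)
instance (id_list : List String) (report : List String) (k : Int) : Decidable (Pre_solution id_list report k) := by
  unfold Pre_solution pvBannedP; infer_instance

def pvWitness_solution : List String × List String × Int := (["muzi", "frodo"], ["muzi frodo", "frodo muzi", "muzi frodo"], 1)

def Spec_solution (id_list : List String) (report : List String) (k : Int) (out : List Int) : Prop := out = solution_alt id_list report k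
instance (id_list : List String) (report : List String) (k : Int) (out : List Int) : Decidable (Spec_solution id_list report k out) := by unfold Spec_solution; infer_instance

-- ===== CLAIM (what is proved, stated in full; the proofs are below) =====
def Claim_equal_solution : Prop := ∀ (id_list : List String) (report : List String) (k : Int), Dom_solution id_list report k → Pre_solution id_list report k → Spec_solution id_list report k (solution id_list report k)

-- ===== LEMMAS AND PROOFS =====

-- an option-threaded fold whose every step succeeds and preserves an invariant is a pure fold
theorem pvFoldlSome {α β : Type} (l : List α) (f : β → α → Option β) (g : β → α → β)
    (P : β → Prop)
    (hstep : ∀ x ∈ l, ∀ acc, P acc → f acc x = some (g acc x) ∧ P (g acc x)) :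
    ∀ b, P b → l.foldl (fun ob x => ob.bind (fun acc => f acc x)) (some b) = some (l.foldl g b) := by
  induction l with
  | nil => intro b _; rfl
  | cons x t ih =>
    intro b hb
    obtain ⟨hfx, hgx⟩ := hstep x (by simp) b hb
    simp only [List.foldl_cons, Option.bind_some, hfx]
    exact ih (fun y hy acc hacc => hstep y (by simp [hy]) acc hacc) _ hgx

theorem pvPyGet0 (xs : List String) (h : 2 ≤ xs.length) :
    PySem.List.pyGet? xs 0 = some (xs.getD 0 "") := by
  rw [show (0:Int) = ((0:Nat):Int) by norm_num, PySem.List.pyGet?_natCast]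
  simp [List.getD_eq_getElem?_getD, (by omega : 0 < xs.length)]

theorem pvPyGet1 (xs : List String) (h : 2 ≤ xs.length) :
    PySem.List.pyGet? xs 1 = some (xs.getD 1 "") := by
  rw [show (1:Int) = ((1:Nat):Int) by norm_num, PySem.List.pyGet?_natCast]
  simp [List.getD_eq_getElem?_getD, (by omega : 1 < xs.length)]

-- ---------- pure artifacts of both ports ----------
def pvUniq (report : List String) : List (String × String) := PySem.Set.ofList (pvPairs report)
def pvReporters (report : List String) (t : String) : List String :=
  ((pvUniq report).filter (fun p => p.2 == t)).map (·.1)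
def pvRecv (report : List String) : List String := PySem.Set.ofList ((pvPairs report).map (·.2))
def pvBase (id_list : List String) : List Int := List.replicate id_list.length 0
def pvIdxN (id_list : List String) (s : String) : Nat := (((pvIdDict id_list).get? s).getD 0).toNat
def pvBump (res : List Int) (n : Nat) : List Int := res.set n (res.getD n 0 + 1)
def pvQ (report : List String) (k : Int) (t : String) : Bool := decide (k ≤ ((pvReporters report t).length : Int))
def pvJsA (id_list report : List String) (k : Int) : List Nat :=
  (((pvRecv report).filter (pvQ report k)).flatMap (fun t => pvUniq report |>.filter (fun p => p.2 == t))).map (fun p => pvIdxN id_list p.1)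
def pvJsB (id_list report : List String) (k : Int) : List Nat :=
  ((pvUniq report).filter (fun p => pvQ report k p.2)).map (fun p => pvIdxN id_list p.1)
def pvGroup (l : List (String × String)) : PySem.Dict String (PySem.Set String) :=
  l.foldl (fun d p => d.modify p.2 PySem.Set.empty (fun s => s.add p.1)) PySem.Dict.empty

-- ---------- id_idx: every listed user gets an in-range index ----------
theorem pvEnumSnd (xs : List String) : ∀ st, (PySem.List.enumerate xs st).map (·.2) = xs := by
  induction xs with
  | nil => intro st; simp [PySem.List.enumerate]
  | cons x t ih => intro st; simp [PySem.List.enumerate, ih]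

theorem pvGetFoldlInsertNotMem (l : List (Int × String)) :
    ∀ (d : PySem.Dict String Int) (s : String), s ∉ l.map (·.2) →
    (l.foldl (fun d p => d.insert p.2 p.1) d).get? s = d.get? s := by
  induction l with
  | nil => intros; rfl
  | cons p t ih =>
    intro d s hs
    simp only [List.map_cons, List.mem_cons, not_or] at hs
    simp only [List.foldl_cons]
    rw [ih _ _ hs.2, PySem.Dict.get?_insert_of_ne _ _ hs.1]

theorem pvEnumFoldGet (xs : List String) : ∀ (st : Int) (d : PySem.Dict String Int) (s : String), s ∈ xs →
    ∃ j : Int, ((PySem.List.enumerate xs st).foldl (fun d p => d.insert p.2 p.1) d).get? s = some j ∧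
      st ≤ j ∧ j < st + xs.length := by
  induction xs with
  | nil => simp
  | cons x t ih =>
    intro st d s hs
    have henum : PySem.List.enumerate (x :: t) st = (st, x) :: PySem.List.enumerate t (st + 1) := by
      simp [PySem.List.enumerate]
    rw [henum]
    simp only [List.foldl_cons]
    by_cases hst : s ∈ t
    · obtain ⟨j, hj, h1, h2⟩ := ih (st + 1) _ s hst
      refine ⟨j, hj, by omega, ?_⟩
      simp only [List.length_cons]; push_cast; omega
    · have hsx : s = x := (List.mem_cons.1 hs).resolve_right hst
      subst hsx
      rw [pvGetFoldlInsertNotMem _ _ _ (by rw [pvEnumSnd]; exact hst)]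
      rw [PySem.Dict.get?_insert_self]
      exact ⟨st, rfl, le_refl _, by simp only [List.length_cons]; push_cast; omega⟩

theorem pvIdDictGet (id_list : List String) (s : String) (hs : s ∈ id_list) :
    ∃ j : Int, (pvIdDict id_list).get? s = some j ∧ 0 ≤ j ∧ j < id_list.length := by
  obtain ⟨j, hj, h1, h2⟩ := pvEnumFoldGet id_list 0 PySem.Dict.empty s hs
  exact ⟨j, hj, h1, by omega⟩

-- an id listed at most once is mapped by the dict to its (unique) position
theorem pvEnumFoldGetCount (xs : List String) : ∀ (st : Int) (d : PySem.Dict String Int) (s : String),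
    xs.count s ≤ 1 → s ∈ xs →
    ((PySem.List.enumerate xs st).foldl (fun d p => d.insert p.2 p.1) d).get? s
      = some (st + (xs.idxOf s : Nat)) := by
  induction xs with
  | nil => simp
  | cons x t ih =>
    intro st d s hcnt hs
    have henum : PySem.List.enumerate (x :: t) st = (st, x) :: PySem.List.enumerate t (st + 1) := by
      simp [PySem.List.enumerate]
    rw [henum]
    simp only [List.foldl_cons]
    by_cases hsx : s = x
    · subst hsx
      have hnt : s ∉ t := by
        rw [List.count_cons_self] at hcnt
        rw [← List.count_eq_zero]
        omega
      rw [pvGetFoldlInsertNotMem _ _ _ (by rw [pvEnumSnd]; exact hnt)]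
      rw [PySem.Dict.get?_insert_self]
      simp
    · have hst : s ∈ t := (List.mem_cons.1 hs).resolve_left hsx
      have hcnt' : t.count s ≤ 1 := by
        rw [List.count_cons_of_ne (Ne.symm hsx)] at hcnt
        exact hcnt
      rw [ih (st + 1) _ s hcnt' hst]
      have hx : (x == s) = false := by simp [Ne.symm hsx]
      rw [List.idxOf_cons, hx]
      simp only [cond_false]
      congr 1
      push_cast
      ring

theorem pvIdxN_eq_idxOf (id_list : List String) (s : String)
    (hcnt : id_list.count s ≤ 1) (hs : s ∈ id_list) :
    pvIdxN id_list s = id_list.idxOf s := by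
  rw [pvIdxN, pvIdDict, pvEnumFoldGetCount id_list 0 PySem.Dict.empty s hcnt hs]
  simp

-- two positions holding an id listed at most once coincide
theorem pvCountUniquePos (xs : List String) (i j : Nat) (hi : i < xs.length) (hj : j < xs.length)
    (hcnt : xs.count xs[i] ≤ 1) (h : xs[i] = xs[j]) : i = j := by
  by_contra hne
  have hdup : xs.Duplicate xs[i] := by
    rw [List.duplicate_iff_exists_distinct_get]
    rcases Nat.lt_or_ge i j with hlt | hge
    · exact ⟨⟨i, hi⟩, ⟨j, hj⟩, by simpa using hlt, by simp, by simp [h]⟩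
    · have hlt : j < i := by omega
      exact ⟨⟨j, hj⟩, ⟨i, hi⟩, by simpa using hlt, by simp [h], by simp⟩
  have := List.duplicate_iff_two_le_count.mp hdup
  omega

-- ---------- the increment step ----------
theorem pvBump_length (res : List Int) (n : Nat) : (pvBump res n).length = res.length := by
  simp [pvBump]

theorem pvIncStep (id_list : List String) (res : List Int) (s : String)
    (hs : s ∈ id_list) (hlen : res.length = id_list.length) :
    ((pvIdDict id_list).get? s).bind (fun j =>
      (PySem.List.pyGet? res j).bind (fun v => PySem.List.pySet? res j (v + 1)))
      = some (pvBump res (pvIdxN id_list s)) := by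
  obtain ⟨j, hj, h0, hlt⟩ := pvIdDictGet id_list s hs
  have hjn : j = ((j.toNat : Nat) : Int) := by omega
  have hnlt : j.toNat < res.length := by omega
  rw [hj]
  simp only [Option.bind_some]
  rw [hjn, PySem.List.pyGet?_natCast, List.getElem?_eq_getElem hnlt]
  simp only [Option.bind_some]
  rw [PySem.List.pySet?_natCast _ _ _ hnlt]
  have : pvIdxN id_list s = j.toNat := by simp [pvIdxN, hj]
  rw [this]
  simp [pvBump, List.getD_eq_getElem?_getD, List.getElem?_eq_getElem hnlt]

-- ---------- grouping dict of port A ----------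
theorem pvGroupGetDGen (l : List (String × String)) :
    ∀ (d : PySem.Dict String (PySem.Set String)) (t : String),
    ((l.foldl (fun d p => d.modify p.2 PySem.Set.empty (fun s => s.add p.1)) d).getD t PySem.Set.empty)
      = (d.getD t PySem.Set.empty).update ((l.filter (fun p => p.2 == t)).map (·.1)) := by
  induction l with
  | nil => intro d t; simp [PySem.Set.update]
  | cons p l ih =>
    intro d t
    simp only [List.foldl_cons, List.filter_cons]
    by_cases h : p.2 = t
    · subst h
      simp only [beq_self_eq_true, if_pos, List.map_cons]
      rw [ih, PySem.Set.update_cons]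
      congr 1
      rw [PySem.Dict.getD_modify]
      simp
    · have hb : (p.2 == t) = false := by simp [h]
      simp only [hb, Bool.false_eq_true, if_neg, not_false_iff]
      rw [ih]
      congr 1
      rw [PySem.Dict.getD_modify]
      simp [Ne.symm h]

theorem pvGroupGetD (l : List (String × String)) (t : String) :
    (pvGroup l).getD t PySem.Set.empty
      = PySem.Set.ofList ((l.filter (fun p => p.2 == t)).map (·.1)) := by
  rw [pvGroup, pvGroupGetDGen, PySem.Dict.getD_empty]
  exact PySem.Set.update_nil_left _

theorem pvGroupKeys (l : List (String × String)) :
    (pvGroup l).keys = PySem.Set.ofList (l.map (·.2)) := by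
  rw [pvGroup, PySem.Dict.keys_foldl_modify_key l (fun p => p.2) PySem.Set.empty
        (fun _ p s => s.add p.1)]
  rw [PySem.Dict.keys_empty, PySem.Set.update_nil_left]

theorem pvGroupKeysNodup (l : List (String × String)) : (pvGroup l).keys.Nodup := by
  rw [pvGroupKeys]; exact PySem.Set.nodup_ofList _

-- first occurrences of reporters of t among the pairs = reporters of t among the first-occurrence pairs
theorem pvOfListFilterMap (l : List (String × String)) (t : String) :
    PySem.Set.ofList ((l.filter (fun p => p.2 == t)).map (·.1))
      = ((PySem.Set.ofList l).filter (fun p => p.2 == t)).map (·.1) := by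
  induction l using List.reverseRecOn with
  | nil => rfl
  | append_singleton xs p ih =>
    rw [PySem.Set.ofList_append_singleton, PySem.Set.add_eq_ite]
    by_cases ht : p.2 = t
    · have hb : (p.2 == t) = true := by simp [ht]
      have hfl : (xs ++ [p]).filter (fun q => q.2 == t) = xs.filter (fun q => q.2 == t) ++ [p] := by
        simp [List.filter_append, hb]
      rw [hfl, List.map_append]
      rw [show List.map (fun (q : String × String) => q.1) [p] = [p.1] from rfl]
      rw [PySem.Set.ofList_append_singleton, ih]
      by_cases hp : p ∈ PySem.Set.ofList xs
      · rw [if_pos hp]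
        apply PySem.Set.add_of_mem
        exact List.mem_map_of_mem (List.mem_filter.2 ⟨hp, hb⟩)
      · rw [if_neg hp, List.filter_append, List.map_append]
        have h1 : (List.filter (fun (q : String × String) => q.2 == t) [p]).map (·.1) = [p.1] := by
          simp [hb]
        rw [h1]
        apply PySem.Set.add_of_not_mem
        intro hmem
        obtain ⟨q, hq, hq1⟩ := List.mem_map.1 hmem
        have hq2 : q.2 = t := by simpa using (List.mem_filter.1 hq).2
        have hqp : q = p := by
          cases q; cases p; simp_all
        exact hp (hqp ▸ (List.mem_filter.1 hq).1)
    · have hb : (p.2 == t) = false := by simp [ht]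
      have hfl : (xs ++ [p]).filter (fun q => q.2 == t) = xs.filter (fun q => q.2 == t) := by
        simp [List.filter_append, hb]
      rw [hfl, ih]
      by_cases hp : p ∈ PySem.Set.ofList xs
      · rw [if_pos hp]
      · rw [if_neg hp, List.filter_append]
        simp [hb]

theorem pvReporters_eq (report : List String) (t : String) :
    PySem.Set.ofList (((pvPairs report).filter (fun p => p.2 == t)).map (·.1)) = pvReporters report t := by
  rw [pvOfListFilterMap]; rfl

-- members of the unique-pair list come from report entries
theorem pvMemUniq (report : List String) (p : String × String) (hp : p ∈ pvUniq report) :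
    ∃ r ∈ report, pvTok0 r = p.1 ∧ pvTok1 r = p.2 := by
  rw [pvUniq, PySem.Set.mem_ofList] at hp
  obtain ⟨r, hr, hrp⟩ := List.mem_map.1 hp
  exact ⟨r, hr, by rw [← hrp], by rw [← hrp]⟩

theorem pvBannedP_iff (report : List String) (k : Int) (t : String) :
    pvBannedP report k t ↔ pvQ report k t = true := by
  rw [pvBannedP, pvQ, decide_eq_true_iff, pvReporters, List.length_map,
      PySem.List.dedup_eq_ofList, pvUniq]

-- the reporter count over the unique pairs is the reporters-list length
theorem pvCountP_snd (report : List String) (t : String) :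
    (pvUniq report).countP (fun q => q.2 == t) = (pvReporters report t).length := by
  rw [pvReporters, List.length_map, List.countP_eq_length_filter]

-- ---------- the grouping permutation ----------
theorem pvFlatMapCongr {α β : Type} (ts : List α) (f g : α → List β)
    (h : ∀ t ∈ ts, f t = g t) : ts.flatMap f = ts.flatMap g := by
  induction ts with
  | nil => rfl
  | cons t ts ih =>
    simp only [List.flatMap_cons]
    rw [h t (by simp), ih (fun u hu => h u (by simp [hu]))]

theorem pvGroupPerm (ts : List String) : ∀ (l : List (String × String)), ts.Nodup →
    (∀ p ∈ l, p.2 ∈ ts) →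
    (ts.flatMap (fun t => l.filter (fun p => p.2 == t))).Perm l := by
  induction ts with
  | nil =>
    intro l _ hmem
    cases l with
    | nil => simp
    | cons p l => exact absurd (hmem p (by simp)) (by simp)
  | cons t ts ih =>
    intro l hnd hmem
    simp only [List.flatMap_cons]
    have hcong : ts.flatMap (fun u => l.filter (fun p => p.2 == u))
        = ts.flatMap (fun u => (l.filter (fun p => !(p.2 == t))).filter (fun p => p.2 == u)) := by
      apply pvFlatMapCongr
      intro u hu
      have hut : u ≠ t := fun h => (List.nodup_cons.1 hnd).1 (h ▸ hu)
      rw [List.filter_filter]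
      apply List.filter_congr
      intro p _
      by_cases h : p.2 = u
      · simp [h, hut]
      · simp [h]
    rw [hcong]
    have hperm := ih (l.filter (fun p => !(p.2 == t))) (List.nodup_cons.1 hnd).2 ?_
    · exact (hperm.append_left (l.filter (fun p => p.2 == t))).trans
        (List.filter_append_perm _ l)
    · intro p hp
      have h1 := (List.mem_filter.1 hp).1
      have h2 := (List.mem_filter.1 hp).2
      rcases List.mem_cons.1 (hmem p h1) with h | h
      · exact absurd h (by simpa using h2)
      · exact h

theorem pvJs_perm (id_list report : List String) (k : Int) :
    (pvJsA id_list report k).Perm (pvJsB id_list report k) := by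
  apply List.Perm.map
  have hinner : ∀ t ∈ (pvRecv report).filter (pvQ report k),
      (pvUniq report).filter (fun p => p.2 == t)
        = ((pvUniq report).filter (fun p => pvQ report k p.2)).filter (fun p => p.2 == t) := by
    intro t ht
    have hQ : pvQ report k t = true := (List.mem_filter.1 ht).2
    rw [List.filter_filter]
    apply List.filter_congr
    intro p _
    by_cases h : p.2 = t
    · simp [h, hQ]
    · simp [h]
  rw [pvFlatMapCongr _ _ _ hinner]
  apply pvGroupPerm
  · exact ((PySem.Set.nodup_ofList _).filter _)
  · intro p hp
    have h1 := (List.mem_filter.1 hp).1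
    have h2 := (List.mem_filter.1 hp).2
    apply List.mem_filter.2
    refine ⟨?_, h2⟩
    rw [pvRecv, PySem.Set.mem_ofList]
    rw [pvUniq, PySem.Set.mem_ofList] at h1
    exact List.mem_map_of_mem h1

-- ---------- shared facts under Pre_ ----------
theorem pvBaseEq (id_list : List String) :
    PySem.List.pyRepeat [0] (PySem.List.len id_list) = pvBase id_list := by
  rw [PySem.List.pyRepeat_singleton, PySem.List.len_eq, Int.toNat_natCast, pvBase]

theorem pvBase_length (id_list : List String) : (pvBase id_list).length = id_list.length := by
  simp [pvBase]

theorem pvReporters_mem (report : List String) (t s : String) (hs : s ∈ pvReporters report t) :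
    ∃ r ∈ report, pvTok0 r = s ∧ pvTok1 r = t := by
  rw [pvReporters] at hs
  obtain ⟨q, hq, hq1⟩ := List.mem_map.1 hs
  have hq2 : q.2 = t := by simpa using (List.mem_filter.1 hq).2
  obtain ⟨r, hr, h0, h1⟩ := pvMemUniq report q (List.mem_filter.1 hq).1
  exact ⟨r, hr, by rw [h0, hq1], by rw [h1, hq2]⟩

theorem pvMemIdList (id_list report : List String) (k : Int)
    (hpre : Pre_solution id_list report k) (t s : String)
    (hq : pvQ report k t = true) (hs : s ∈ pvReporters report t) :
    s ∈ id_list ∧ id_list.count s ≤ 1 := by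
  obtain ⟨r, hr, h0, h1⟩ := pvReporters_mem report t s hs
  have hban : pvBannedP report k (pvTok1 r) := by
    rw [h1]; exact (pvBannedP_iff report k t).2 hq
  rw [← h0]; exact (hpre r hr).2 hban

-- every reporter in a qualifying unique pair is a listed, at-most-once id
theorem pvMemIdList' (id_list report : List String) (k : Int)
    (hpre : Pre_solution id_list report k) (p : String × String)
    (hp : p ∈ pvUniq report) (hq : pvQ report k p.2 = true) :
    p.1 ∈ id_list ∧ id_list.count p.1 ≤ 1 := by
  apply pvMemIdList id_list report k hpre p.2 p.1 hq
  rw [pvReporters]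
  exact List.mem_map_of_mem (List.mem_filter.2 ⟨hp, by simp⟩)

-- ---------- counting characterisation of the bump fold ----------
theorem pvFoldlBump_length (js : List Nat) : ∀ (res : List Int),
    (js.foldl pvBump res).length = res.length := by
  induction js with
  | nil => intro res; rfl
  | cons j js ih =>
    intro res
    rw [List.foldl_cons, ih, pvBump_length]

theorem pvFoldlBumpGetD (js : List Nat) : ∀ (res : List Int) (i : Nat), i < res.length →
    (js.foldl pvBump res).getD i 0 = res.getD i 0 + (js.count i : Int) := by
  induction js with
  | nil => intro res i _; simp
  | cons j js ih =>
    intro res i hi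
    rw [List.foldl_cons, ih (pvBump res j) i (by rw [pvBump_length]; exact hi), List.count_cons]
    by_cases hji : j = i
    · subst hji
      have h1 : (pvBump res j).getD j 0 = res.getD j 0 + 1 := by
        simp [pvBump, List.getD_eq_getElem?_getD, List.getElem?_set_self',
          List.getElem?_eq_getElem hi]
      rw [h1]
      simp only [beq_self_eq_true, if_pos]
      push_cast
      ring
    · have h1 : (pvBump res j).getD i 0 = res.getD i 0 := by
        simp [pvBump, List.getD_eq_getElem?_getD, List.getElem?_set_ne hji]
      rw [h1]
      have h2 : (j == i) = false := by simp [hji]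
      rw [h2]
      simp

-- ---------- extraction of port B ----------
theorem pvSolutionB (id_list report : List String) (k : Int)
    (hpre : Pre_solution id_list report k) :
    solution_alt id_list report k
      = id_list.map (fun user =>
          (((((pvUniq report).filter (fun p => pvQ report k p.2)).countP (fun p => p.1 == user)) : Nat) : Int)) := by
  have hsplit : ∀ r ∈ report, 2 ≤ (PySem.Str.split₀ r).length := fun r hr => (hpre r hr).1
  simp only [solution_alt]
  -- the pair-set loop
  have hB1 : report.foldl (fun os r => os.bind (fun s =>
        (PySem.List.pyGet? (PySem.Str.split₀ r) 0).bind (fun a =>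
          (PySem.List.pyGet? (PySem.Str.split₀ r) 1).map (fun b => PySem.Set.add s (a, b)))))
      (some PySem.Set.empty) = some (pvUniq report) := by
    have h1 := pvFoldlSome report
      (fun s r => (PySem.List.pyGet? (PySem.Str.split₀ r) 0).bind (fun a =>
          (PySem.List.pyGet? (PySem.Str.split₀ r) 1).map (fun b => PySem.Set.add s (a, b))))
      (fun s r => PySem.Set.add s (pvTok0 r, pvTok1 r)) (fun _ => True)
      (fun r hr acc _ => by
        constructor
        · show (PySem.List.pyGet? (PySem.Str.split₀ r) 0).bind _ = _
          rw [pvPyGet0 _ (hsplit r hr), pvPyGet1 _ (hsplit r hr)]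
          rfl
        · trivial) PySem.Set.empty trivial
    rw [h1]
    congr 1
    rw [pvUniq, PySem.Set.ofList_eq_foldl, pvPairs, List.foldl_map]
    rfl
  rw [hB1]
  simp only []
  -- the banned-set comprehension: the qualifying receivers, as a set
  have hban : (pvUniq report).foldl (fun s p =>
        if k ≤ (((pvUniq report).countP (fun q => q.2 == p.2) : Nat) : Int) then PySem.Set.add s p.2 else s)
        PySem.Set.empty
      = PySem.Set.ofList (((pvUniq report).filter (fun p => pvQ report k p.2)).map (·.2)) := by
    have hcond : ∀ (s : PySem.Set String) (p : String × String),
        (if k ≤ (((pvUniq report).countP (fun q => q.2 == p.2) : Nat) : Int) then PySem.Set.add s p.2 else s)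
          = (if pvQ report k p.2 then PySem.Set.add s p.2 else s) := by
      intro s p
      rw [pvQ, pvCountP_snd]
      by_cases h : k ≤ ((pvReporters report p.2).length : Int)
      · rw [if_pos h, if_pos (by simp [h])]
      · rw [if_neg h, if_neg (by simp [h])]
    rw [PySem.List.foldl_congr_mem (pvUniq report) _
        (fun (s : PySem.Set String) (p : String × String) =>
          if pvQ report k p.2 then PySem.Set.add s p.2 else s)
        PySem.Set.empty (fun s p _ => hcond s p)]
    rw [PySem.List.foldl_if_eq_foldl_filter (fun (p : String × String) => pvQ report k p.2)
        (fun (s : PySem.Set String) (p : String × String) => PySem.Set.add s p.2)]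
    rw [← PySem.Set.update_map_eq_foldl_add
        (((pvUniq report).filter (fun p => pvQ report k p.2))) (fun (p : String × String) => p.2) PySem.Set.empty]
    exact (PySem.Set.update_nil_left _).symm
  rw [hban]
  -- membership in the banned set is the qualification test, for members of the pair set
  have hcontains : ∀ p ∈ pvUniq report,
      PySem.Set.contains (PySem.Set.ofList (((pvUniq report).filter (fun p => pvQ report k p.2)).map (·.2))) p.2
        = pvQ report k p.2 := by
    intro p hp
    by_cases hq : pvQ report k p.2 = true
    · rw [hq]
      rw [PySem.Set.contains_iff, PySem.Set.mem_ofList]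
      exact List.mem_map_of_mem (List.mem_filter.2 ⟨hp, hq⟩)
    · have hq' : pvQ report k p.2 = false := by revert hq; cases pvQ report k p.2 <;> simp
      rw [hq']
      apply Bool.eq_false_iff.2
      intro hc
      rw [PySem.Set.contains_iff, PySem.Set.mem_ofList] at hc
      obtain ⟨q, hqf, hq2⟩ := List.mem_map.1 hc
      have hqQ : pvQ report k q.2 = true := (List.mem_filter.1 hqf).2
      rw [hq2, hq'] at hqQ
      exact absurd hqQ (by simp)
    -- per-user count: the '&&' test over all pairs is the test over the qualifying pairs
  apply List.map_congr_left
  intro user _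
  congr 1
  have hcongr : (pvUniq report).countP (fun p => p.1 == user &&
        PySem.Set.contains (PySem.Set.ofList (((pvUniq report).filter (fun p => pvQ report k p.2)).map (·.2))) p.2)
      = (pvUniq report).countP (fun p => p.1 == user && pvQ report k p.2) := by
    apply List.countP_congr
    intro p hp
    rw [hcontains p hp]
  rw [hcongr, ← List.countP_filter]

-- ---------- extraction of port A ----------
theorem pvSolutionA (id_list report : List String) (k : Int)
    (hpre : Pre_solution id_list report k) :
    solution id_list report k = (pvJsA id_list report k).foldl pvBump (pvBase id_list) := by
  have hsplit : ∀ r ∈ report, 2 ≤ (PySem.Str.split₀ r).length := fun r hr => (hpre r hr).1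
  simp only [solution]
  -- the grouping loop
  have hA1 : (report.map PySem.Str.split₀).foldl (fun od pair => od.bind (fun d =>
        (PySem.List.pyGet? pair 1).bind (fun rcv =>
          (PySem.List.pyGet? pair 0).map (fun snd =>
            d.modify rcv PySem.Set.empty (fun s => s.add snd)))))
      (some PySem.Dict.empty) = some (pvGroup (pvPairs report)) := by
    rw [List.foldl_map]
    have h1 := pvFoldlSome report
      (fun d r => (PySem.List.pyGet? (PySem.Str.split₀ r) 1).bind (fun rcv =>
          (PySem.List.pyGet? (PySem.Str.split₀ r) 0).map (fun snd =>
            d.modify rcv PySem.Set.empty (fun s => s.add snd))))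
      (fun d r => d.modify (pvTok1 r) PySem.Set.empty (fun s => s.add (pvTok0 r))) (fun _ => True)
      (fun r hr acc _ => by
        constructor
        · show (PySem.List.pyGet? (PySem.Str.split₀ r) 1).bind _ = _
          rw [pvPyGet0 _ (hsplit r hr), pvPyGet1 _ (hsplit r hr)]
          rfl
        · trivial) PySem.Dict.empty trivial
    rw [h1]
    congr 1
    rw [pvGroup, pvPairs, List.foldl_map]
  rw [hA1]
  simp only [Option.bind_some]
  -- the items list is the receivers paired with their reporter sets
  have hitems : (pvGroup (pvPairs report)).items
      = (pvRecv report).map (fun t => (t, pvReporters report t)) := by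
    rw [PySem.Dict.items_eq_map_keys _ (pvGroupKeysNodup _) PySem.Set.empty, pvGroupKeys]
    apply List.map_congr_left
    intro t _
    rw [pvGroupGetD, pvReporters_eq]
  rw [hitems, pvBaseEq]
  -- the mail loop
  have hres : ((pvRecv report).map (fun t => (t, pvReporters report t))).foldl
      (fun ores p => ores.bind (fun res =>
        if k ≤ PySem.Set.len p.2 then
          p.2.foldl (fun or snd => or.bind (fun r =>
            ((pvIdDict id_list).get? snd).bind (fun j =>
              (PySem.List.pyGet? r j).bind (fun v => PySem.List.pySet? r j (v + 1))))) (some res)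
        else some res)) (some (pvBase id_list))
      = some (((pvRecv report).map (fun t => (t, pvReporters report t))).foldl
          (fun res p => if k ≤ (p.2.length : Int)
            then p.2.foldl (fun r s => pvBump r (pvIdxN id_list s)) res else res) (pvBase id_list)) := by
    apply pvFoldlSome _ _ _ (fun res => res.length = id_list.length)
    · intro p hp res hlen
      obtain ⟨t, _, hpt⟩ := List.mem_map.1 hp
      have hlenp : PySem.Set.len p.2 = (p.2.length : Int) := by simp [PySem.Set.len]
      rw [hlenp]
      by_cases hk : k ≤ (p.2.length : Int)
      · rw [if_pos hk, if_pos hk]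
        have hq : pvQ report k t = true := by
          rw [pvQ, decide_eq_true_eq]
          have : p.2 = pvReporters report t := by rw [← hpt]
          rw [← this]; exact hk
        have hmemid : ∀ s ∈ p.2, s ∈ id_list := by
          intro s hs
          apply (pvMemIdList id_list report k hpre t s hq · |>.1)
          have : p.2 = pvReporters report t := by rw [← hpt]
          rw [← this]; exact hs
        have hinner := pvFoldlSome p.2
          (fun r snd => ((pvIdDict id_list).get? snd).bind (fun j =>
              (PySem.List.pyGet? r j).bind (fun v => PySem.List.pySet? r j (v + 1))))
          (fun r s => pvBump r (pvIdxN id_list s)) (fun res => res.length = id_list.length)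
          (fun s hs acc hacc => ⟨pvIncStep id_list acc s (hmemid s hs) hacc,
            by show (pvBump acc (pvIdxN id_list s)).length = id_list.length
               rw [pvBump_length]; exact hacc⟩) res hlen
        refine ⟨hinner, ?_⟩
        -- length invariant of the inner fold
        have : ∀ (l : List String) (res : List Int), res.length = id_list.length →
            (l.foldl (fun r s => pvBump r (pvIdxN id_list s)) res).length = id_list.length := by
          intro l
          induction l with
          | nil => intro res h; exact h
          | cons s l ih =>
            intro res h
            rw [List.foldl_cons]
            refine ih _ ?_
            show (pvBump res (pvIdxN id_list s)).length = id_list.length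
            rw [pvBump_length]; exact h
        exact this p.2 res hlen
      · rw [if_neg hk, if_neg hk]
        exact ⟨rfl, hlen⟩
    · exact pvBase_length id_list
  rw [hres]
  simp only [Option.getD_some]
  -- reshape the pure fold into a flat fold over pvJsA
  rw [PySem.List.foldl_ite_eq_foldl_filter
      (fun (p : String × PySem.Set String) => k ≤ (p.2.length : Int))
      (fun res p => p.2.foldl (fun r s => pvBump r (pvIdxN id_list s)) res)]
  rw [List.filter_map]
  have hcomp : ((fun (p : String × PySem.Set String) => decide (k ≤ (p.2.length : Int)))
      ∘ (fun t => (t, pvReporters report t))) = pvQ report k := by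
    funext t; rw [pvQ]; rfl
  rw [hcomp, List.foldl_map]
  have hflat : ∀ (ts : List String) (init : List Int),
      ts.foldl (fun res t => (pvReporters report t).foldl (fun r s => pvBump r (pvIdxN id_list s)) res) init
        = (ts.flatMap (fun t => (pvReporters report t).map (pvIdxN id_list))).foldl pvBump init := by
    intro ts init
    rw [List.foldl_flatMap]
    apply PySem.List.foldl_congr_mem
    intro acc t _
    rw [List.foldl_map]
  rw [hflat]
  congr 1
  rw [pvJsA, List.map_flatMap]
  apply pvFlatMapCongr
  intro t _
  rw [pvReporters, List.map_map]
  rfl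

-- ===== VERDICT (by name: the statement is the Claim_ definition above) =====
theorem solution_spec : Claim_equal_solution := by
  intro id_list report k _ hpre
  unfold Spec_solution
  rw [pvSolutionA id_list report k hpre, pvSolutionB id_list report k hpre]
  apply List.ext_getElem
  · rw [pvFoldlBump_length, pvBase_length, List.length_map]
  · intro i hiA hiB
    have hi : i < id_list.length := by
      rw [List.length_map] at hiB; exact hiB
    have hgetD : ((pvJsA id_list report k).foldl pvBump (pvBase id_list)).getD i 0
        = ((pvJsA id_list report k).count i : Int) := by
      rw [pvFoldlBumpGetD _ _ _ (by rw [pvBase_length]; exact hi)]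
      simp [pvBase]
    have hA : ((pvJsA id_list report k).foldl pvBump (pvBase id_list))[i]
        = ((pvJsA id_list report k).count i : Int) := by
      rw [← hgetD, List.getD_eq_getElem?_getD, List.getElem?_eq_getElem hiA]
      rfl
    rw [hA, List.getElem_map]
    congr 1
    rw [(pvJs_perm id_list report k).count_eq, pvJsB, List.count_eq_countP, List.countP_map]
    apply List.countP_congr
    intro p hp
    have hpu : p ∈ pvUniq report := (List.mem_filter.1 hp).1
    have hpq : pvQ report k p.2 = true := (List.mem_filter.1 hp).2
    obtain ⟨hmem, hcnt⟩ := pvMemIdList' id_list report k hpre p hpu hpq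
    have hidx : pvIdxN id_list p.1 = id_list.idxOf p.1 :=
      pvIdxN_eq_idxOf id_list p.1 hcnt hmem
    have hilt : id_list.idxOf p.1 < id_list.length := by
      rw [List.idxOf_lt_length_iff]; exact hmem
    have hig : id_list[id_list.idxOf p.1] = p.1 := List.getElem_idxOf hilt
    have hbeq : (pvIdxN id_list p.1 == i) = (p.1 == id_list[i]) := by
      rw [hidx]
      by_cases h : p.1 = id_list[i]
      · have hio : id_list.idxOf p.1 = i := by
          apply pvCountUniquePos id_list _ _ hilt hi
          · rw [hig]; exact hcnt
          · rw [hig, h]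
        rw [hio]
        simp [h]
      · have hio : id_list.idxOf p.1 ≠ i := by
          intro hc
          apply h
          have h3 : id_list[id_list.idxOf p.1]? = some p.1 := by
            rw [List.getElem?_eq_getElem hilt]
            exact congrArg some hig
          rw [hc, List.getElem?_eq_getElem hi] at h3
          exact (Option.some.inj h3).symm
        simp [hio, h]
    simp only [Function.comp_apply, hbeq]
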